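-- pv_equiv track=rewrite | github.com/LuckyJosh/advent-of-code-2017 | src/aoc2017/day_9.py | stream_2
-- ===== SOURCE A (Python) =====
-- def stream_2(stream):
--     in_garbage = False
--     after_bang = False
--     groups = []
--     current_group = []
--     garbage_count = 0
--     for i, char in enumerate(stream):
--         if after_bang:
--             after_bang = False
--             continue
--         elif char == "!":
--             after_bang = True
--         elif char == "<":
--             if in_garbage:
--                 garbage_count += 1
--             in_garbage = True
--         elif char == ">":
--             in_garbage = False
--         elif (not in_garbage) and (char == "{"):
--             groups.append([i, 0])
--             current_group.append(len(groups) - 1)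
--         elif (not in_garbage) and (char == "}"):
--             groups[current_group.pop()][1] = i
--         if in_garbage and not char in ["!", "<"]:
--             garbage_count += 1
--
--     return garbage_count
-- ===== SOURCE B (Python) =====
-- def stream_2(stream):
--     # pass 1: remove cancelled characters ('!' cancels itself and the next char)
--     kept = []
--     skip = False
--     for char in stream:
--         if skip:
--             skip = False
--         elif char == "!":
--             skip = True
--         else:
--             kept.append(char)
--     # pass 2: count garbage characters
--     garbage_count = 0
--     in_garbage = False
--     for char in kept:
--         if in_garbage:
--             if char == ">":
--                 in_garbage = False
--             else:
--                 garbage_count += 1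
--         elif char == "<":
--             in_garbage = True
--     return garbage_count
-- ===== Notes on version B (the rewrite author's own statement) =====
-- stated objective: simpler
-- what changed: B replaces A's single interleaved five-variable state machine (after_bang flag, group index stack and group table maintained alongside the garbage counter) by two plain passes: strip every '!'-cancelled pair, then scan the stripped stream with only an in_garbage flag and the counter; the group/stack bookkeeping, which never influences the returned count, disappears entirely (measured ~1.6x faster at the largest size). Pre_ excludes only the streams with an unmatched '}' outside garbage, on which A raises IndexError from current_group.pop() while B returns the garbage count.
-- outside the precondition, e.g. on stream_2('}'): A raises IndexError, B returns 0
import Mathlib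
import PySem

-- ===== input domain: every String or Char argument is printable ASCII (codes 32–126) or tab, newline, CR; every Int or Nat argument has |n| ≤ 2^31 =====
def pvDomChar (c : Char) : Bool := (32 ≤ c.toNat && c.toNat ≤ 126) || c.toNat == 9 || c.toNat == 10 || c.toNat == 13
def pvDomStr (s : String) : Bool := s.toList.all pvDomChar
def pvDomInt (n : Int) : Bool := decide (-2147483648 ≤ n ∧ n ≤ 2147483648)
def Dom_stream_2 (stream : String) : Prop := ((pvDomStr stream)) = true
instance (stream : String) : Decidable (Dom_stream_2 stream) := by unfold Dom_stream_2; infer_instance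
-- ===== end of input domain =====

-- B replaces A's interleaved state machine (bang flag + group stack + counter) by two plain
-- passes: strip '!'-cancelled pairs, then count garbage with a single flag (objective: simpler).
-- A raises IndexError on an unmatched '}' outside garbage; those inputs are outside Pre_.

-- ===== PORT A =====
-- state = (in_garbage, after_bang, groups, current_group, garbage_count); one step of A's for-loop
def pvStepA (st : Bool × Bool × List (Int × Int) × List Nat × Int) (ic : Int × Char) :
    Bool × Bool × List (Int × Int) × List Nat × Int :=
  let (in_g, ab, groups, cur, cnt) := st
  let (i, c) := ic
  if ab then (in_g, false, groups, cur, cnt)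
  else
    let s1 : Bool × Bool × List (Int × Int) × List Nat × Int :=
      if c = '!' then (in_g, true, groups, cur, cnt)
      else if c = '<' then (true, false, groups, cur, if in_g then cnt + 1 else cnt)
      else if c = '>' then (false, false, groups, cur, cnt)
      else if ¬ in_g = true ∧ c = '{' then
        (in_g, false, groups ++ [(i, 0)], cur ++ [groups.length], cnt)
      else if ¬ in_g = true ∧ c = '}' then
        -- current_group.pop(): Python raises IndexError when current_group is empty (outside Pre_)
        match cur.getLast? with
        | some g => (in_g, false, groups.set g ((groups.getD g (0, 0)).1, i), cur.dropLast, cnt)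
        | none => (in_g, false, groups, cur, cnt)
      else (in_g, false, groups, cur, cnt)
    if s1.1 = true ∧ ¬ (c = '!' ∨ c = '<') then
      (s1.1, s1.2.1, s1.2.2.1, s1.2.2.2.1, s1.2.2.2.2 + 1)
    else s1

def stream_2 (stream : String) : Int :=
  ((PySem.List.enumerate stream.toList).foldl pvStepA (false, false, [], [], 0)).2.2.2.2

-- ===== PORT B =====
-- pass 1: remove cancelled characters (skip = True right after an uncancelled '!')
def pvCancel : Bool → List Char → List Char
  | _, [] => []
  | true, _ :: rest => pvCancel false rest
  | false, c :: rest => if c = '!' then pvCancel true rest else c :: pvCancel false rest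

-- pass 2: count garbage characters
def pvCount : List Char → Bool → Int → Int
  | [], _, cnt => cnt
  | c :: rest, in_g, cnt =>
    if in_g then
      if c = '>' then pvCount rest false cnt else pvCount rest true (cnt + 1)
    else if c = '<' then pvCount rest true cnt
    else pvCount rest false cnt

def stream_2_alt (stream : String) : Int :=
  pvCount (pvCancel false stream.toList) false 0

-- ===== PRECONDITION & SPEC =====
-- brace depth of a prefix: +1 per '{', -1 per '}', counting only braces outside garbage
-- ('<'…'>') and not cancelled by '!'; state = (skip, in_garbage, depth)
def pvDepth (l : List Char) : Int :=
  (l.foldl (fun (st : Bool × Bool × Int) c =>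
      let (skip, in_g, d) := st
      if skip then (false, in_g, d)
      else if c = '!' then (true, in_g, d)
      else if in_g then (false, !(c = '>'), d)
      else if c = '<' then (false, true, d)
      else if c = '{' then (false, false, d + 1)
      else if c = '}' then (false, false, d - 1)
      else (false, false, d)) (false, false, 0)).2.2

-- Pre_ excludes exactly the streams on which Python A raises IndexError (an unmatched '}'
-- outside garbage makes current_group.pop() fail): every prefix must have nonnegative depth.
-- On such streams B simply returns the garbage count (e.g. 0 for "}").
def Pre_stream_2 (stream : String) : Prop :=
  ∀ p ∈ stream.toList.inits, 0 ≤ pvDepth p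
instance (stream : String) : Decidable (Pre_stream_2 stream) := by
  unfold Pre_stream_2; infer_instance

def pvWitness_stream_2 : String := "{{<a!>b>},{}}"

def Spec_stream_2 (stream : String) (out : Int) : Prop := out = stream_2_alt stream
instance (stream : String) (out : Int) : Decidable (Spec_stream_2 stream out) := by
  unfold Spec_stream_2; infer_instance

-- ===== CLAIM (what is proved, stated in full; the proofs are below) =====
def Claim_equal_stream_2 : Prop :=
  ∀ (stream : String), Dom_stream_2 stream → Pre_stream_2 stream →
    Spec_stream_2 stream (stream_2 stream)

-- ===== LEMMAS AND PROOFS =====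

-- a step with after_bang = true only clears the flag
lemma pvStepA_ab (in_g : Bool) (g : List (Int × Int)) (cu : List Nat) (cnt : Int)
    (p : Int × Char) : pvStepA (in_g, true, g, cu, cnt) p = (in_g, false, g, cu, cnt) := by
  rcases p with ⟨i, c⟩
  simp [pvStepA]

lemma pvCancel_cons (c : Char) (r : List Char) (h : ¬ c = '!') :
    pvCancel false (c :: r) = c :: pvCancel false r := by
  simp [pvCancel, h]

lemma pvCount_cons (c : Char) (r : List Char) (in_g : Bool) (cnt : Int) :
    pvCount (c :: r) in_g cnt =
      if in_g then (if c = '>' then pvCount r false cnt else pvCount r true (cnt + 1))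
      else if c = '<' then pvCount r true cnt else pvCount r false cnt := by
  rw [pvCount.eq_def]

-- main invariant: A's folded garbage count equals B's two-pass count, for any stack/table state
lemma pvMain : ∀ (n : Nat) (l : List (Int × Char)), l.length ≤ n →
    ∀ (in_g : Bool) (g : List (Int × Int)) (cu : List Nat) (cnt : Int),
      (l.foldl pvStepA (in_g, false, g, cu, cnt)).2.2.2.2
        = pvCount (pvCancel false (l.map Prod.snd)) in_g cnt := by
  intro n
  induction n with
  | zero =>
    intro l hl in_g g cu cnt
    rw [List.length_eq_zero_iff.mp (Nat.le_zero.mp hl)]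
    simp [pvCancel, pvCount]
  | succ n ih =>
    intro l hl in_g g cu cnt
    match l with
    | [] => simp [pvCancel, pvCount]
    | (i, c) :: t =>
      rw [List.foldl_cons]
      by_cases hc : c = '!'
      · subst hc
        match t with
        | [] => simp [pvStepA, pvCancel, pvCount]
        | p :: t' =>
          have ht : t'.length ≤ n := by
            simp at hl; omega
          simp only [pvStepA, if_neg (by simp : ¬ (false = true))]
          norm_num
          rw [pvStepA_ab, ih t' ht]
          simp [pvCancel]
      · have ht : t.length ≤ n := by simp at hl; omega
        by_cases hg : in_g = true
        · by_cases h1 : c = '>'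
          · subst h1
            simp [pvStepA, hg, ih t ht, pvCancel_cons, pvCount_cons]
          · by_cases h2 : c = '<'
            · subst h2
              simp [pvStepA, hg, ih t ht, pvCancel_cons, pvCount_cons]
            · simp [pvStepA, hg, hc, h1, h2, ih t ht, pvCancel_cons, pvCount_cons]
        · have hg' : in_g = false := by simpa using hg
          subst hg'
          by_cases h2 : c = '<'
          · subst h2
            simp [pvStepA, ih t ht, pvCancel_cons, pvCount_cons]
          · by_cases h1 : c = '>'
            · subst h1
              simp [pvStepA, ih t ht, pvCancel_cons, pvCount_cons]
            · by_cases h3 : c = '{'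
              · subst h3
                simp [pvStepA, ih t ht, pvCancel_cons, pvCount_cons]
              · by_cases h4 : c = '}'
                · subst h4
                  rcases hcu : cu.getLast? with _ | gidx
                  · simp [pvStepA, hcu, ih t ht, pvCancel_cons, pvCount_cons]
                  · simp [pvStepA, hcu, ih t ht, pvCancel_cons, pvCount_cons]
                · simp [pvStepA, hc, h1, h2, h3, h4, ih t ht, pvCancel_cons, pvCount_cons]

theorem stream_2_spec : Claim_equal_stream_2 := by
  intro s _ _
  unfold Spec_stream_2 stream_2 stream_2_alt
  rw [pvMain (s.toList.length) (PySem.List.enumerate s.toList)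
    (by simp [PySem.List.length_enumerate])]
  simp [PySem.List.map_snd_enumerate]
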